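-- pv_equiv track=rewrite | github.com/do-hyung-kim/algorithm_study | book/remeberPI.py | checkStore
-- ===== SOURCE A (Python) =====
-- def checkStore(numStr):
--     zigzag = (numStr[0] - numStr[1]) == (numStr[2] - numStr[1])
--     diff = numStr[0] - numStr[1]
--     prev = numStr[1]
--     for idx in range(2, len(numStr)):
--         if (prev - numStr[idx]) != diff:
--             if not zigzag or (numStr[idx] - prev) != diff:
--                 return 10
--             diff = -1 * diff
--         prev = numStr[idx]
--
--     if diff == 0:
--         return 1
--     elif zigzag:
--         return 4
--     elif diff == 1 or diff == -1:
--         return 2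
--     else:
--         return 5
-- ===== SOURCE B (Python) =====
-- def checkStore(numStr):
--     d = numStr[0] - numStr[1]
--     zigzag = d == numStr[2] - numStr[1]
--     last = numStr[-2] - numStr[-1]
--     if zigzag:
--         ok = all((x - y) * (x - y) == d * d for x, y in zip(numStr, numStr[1:]))
--     else:
--         ok = all(numStr[i] == numStr[0] - i * d for i in range(len(numStr)))
--     if not ok:
--         return 10
--     if last == 0:
--         return 1
--     if zigzag:
--         return 4
--     if last * last == 1:
--         return 2
--     return 5
-- ===== Notes on version B (the rewrite author's own statement) =====
-- stated objective: alternative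
-- what changed: Replaced A's stateful flip-tracking scan (mutable diff negated on zigzag mismatch, early return, classification on the surviving loop state) with two branch-specific stateless checks: a closed-form arithmetic-progression test numStr[i] == numStr[0]-i*d for the non-zigzag case and a squared-difference test (x-y)**2 == d*d over zipped adjacent pairs for the zigzag case, classifying on the endpoint difference numStr[-2]-numStr[-1] computed directly.
import Mathlib
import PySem

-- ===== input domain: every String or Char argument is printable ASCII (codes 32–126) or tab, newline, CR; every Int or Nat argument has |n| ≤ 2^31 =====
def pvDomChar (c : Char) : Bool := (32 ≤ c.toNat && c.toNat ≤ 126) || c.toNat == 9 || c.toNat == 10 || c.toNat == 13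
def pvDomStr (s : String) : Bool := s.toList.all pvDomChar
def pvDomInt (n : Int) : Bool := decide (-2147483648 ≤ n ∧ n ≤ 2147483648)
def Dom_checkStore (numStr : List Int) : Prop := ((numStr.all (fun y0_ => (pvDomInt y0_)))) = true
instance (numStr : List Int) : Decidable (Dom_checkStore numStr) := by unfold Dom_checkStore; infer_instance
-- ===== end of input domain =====

-- B replaces A's stateful flip-tracking scan by two stateless branch-specific checks
-- (closed-form arithmetic progression / squared adjacent differences) classified on the
-- endpoint difference numStr[-2]-numStr[-1] (objective: alternative decomposition, same cost).

-- ===== PORT A =====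
-- the for-loop of A: state (diff, prev), early `return 10`, then the final if-chain
def checkStore_go (numStr : List Int) (zigzag : Bool) : List Int → Int → Int → Int
  | [], diff, _ =>
    if diff = 0 then 1
    else if zigzag then 4
    else if diff = 1 ∨ diff = -1 then 2
    else 5
  | idx :: rest, diff, prev =>
    let cur := (PySem.List.pyGet? numStr idx).getD 0
    if prev - cur ≠ diff then
      if ¬ zigzag = true ∨ cur - prev ≠ diff then 10
      else checkStore_go numStr zigzag rest (-1 * diff) cur
    else checkStore_go numStr zigzag rest diff cur

def checkStore (numStr : List Int) : Int :=
  let a0 := (PySem.List.pyGet? numStr 0).getD 0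
  let a1 := (PySem.List.pyGet? numStr 1).getD 0
  let a2 := (PySem.List.pyGet? numStr 2).getD 0
  let zigzag : Bool := (a0 - a1) == (a2 - a1)
  checkStore_go numStr zigzag (PySem.List.pyRange 2 numStr.length 1) (a0 - a1) a1

-- ===== PORT B =====
def checkStore_alt (numStr : List Int) : Int :=
  let d := (PySem.List.pyGet? numStr 0).getD 0 - (PySem.List.pyGet? numStr 1).getD 0
  let zigzag : Bool := d == (PySem.List.pyGet? numStr 2).getD 0 - (PySem.List.pyGet? numStr 1).getD 0
  let last := (PySem.List.pyGet? numStr (-2)).getD 0 - (PySem.List.pyGet? numStr (-1)).getD 0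
  let ok : Bool :=
    if zigzag then
      (numStr.zip (PySem.List.slice numStr (some 1) none)).all
        (fun p => (p.1 - p.2) * (p.1 - p.2) == d * d)
    else
      (PySem.List.pyRange 0 (numStr.length : Int) 1).all
        (fun i => (PySem.List.pyGet? numStr i).getD 0 == (PySem.List.pyGet? numStr 0).getD 0 - i * d)
  if ¬ ok = true then 10
  else if last = 0 then 1
  else if zigzag then 4
  else if last * last = 1 then 2
  else 5

-- ===== PRECONDITION & SPEC =====
-- Python A raises IndexError (numStr[2]) when the list has fewer than 3 elements.
def Pre_checkStore (numStr : List Int) : Prop := 3 ≤ numStr.length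
instance (numStr : List Int) : Decidable (Pre_checkStore numStr) := by unfold Pre_checkStore; infer_instance
def pvWitness_checkStore : List Int := [3, 2, 3, 2]

def Spec_checkStore (numStr : List Int) (out : Int) : Prop := out = checkStore_alt numStr
instance (numStr : List Int) (out : Int) : Decidable (Spec_checkStore numStr out) := by unfold Spec_checkStore; infer_instance

-- ===== CLAIM (what is proved, stated in full; the proofs are below) =====
def Claim_equal_checkStore : Prop := ∀ (numStr : List Int), Dom_checkStore numStr → Pre_checkStore numStr → Spec_checkStore numStr (checkStore numStr)

-- ===== LEMMAS AND PROOFS =====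

-- proof-side structural versions
def pvClassify (zig : Bool) (v : Int) : Int :=
  if v = 0 then 1 else if zig then 4 else if v = 1 ∨ v = -1 then 2 else 5

def pvGo (zig : Bool) : Int → Int → List Int → Int
  | diff, _, [] => pvClassify zig diff
  | diff, prev, c :: t =>
    if prev - c ≠ diff then
      if ¬ zig = true ∨ c - prev ≠ diff then 10
      else pvGo zig (-1 * diff) c t
    else pvGo zig diff c t

def pvAdj : List Int → List Int
  | a :: b :: t => (a - b) :: pvAdj (b :: t)
  | _ => []

lemma pvAdj_length : ∀ l : List Int, (pvAdj l).length = l.length - 1 := by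
  intro l
  match l with
  | [] => rfl
  | [a] => rfl
  | a :: b :: t => simp [pvAdj, pvAdj_length (b :: t)]

lemma pvAdj_getElem : ∀ (l : List Int) (k : Nat) (h : k < (pvAdj l).length)
    (h1 : k < l.length) (h2 : k + 1 < l.length), (pvAdj l)[k] = l[k] - l[k + 1] := by
  intro l
  match l with
  | [] => intro k h h1 h2; simp [pvAdj] at h
  | [a] => intro k h h1 h2; simp [pvAdj] at h
  | a :: b :: t =>
    intro k h h1 h2
    match k with
    | 0 => simp [pvAdj]
    | k + 1 =>
      have := pvAdj_getElem (b :: t) k (by simpa [pvAdj] using h)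
        (by simpa using h1) (by simpa using h2)
      simpa [pvAdj] using this

-- bridge A: the index loop equals the structural loop over the suffix
lemma bridgeA (numStr : List Int) (zig : Bool) :
    ∀ (k i : Nat) (diff prev : Int), numStr.length - i ≤ k →
      checkStore_go numStr zig (PySem.List.pyRange (i : Int) (numStr.length : Int) 1) diff prev
        = pvGo zig diff prev (numStr.drop i) := by
  intro k
  induction k with
  | zero =>
    intro i diff prev hk
    have hle : numStr.length ≤ i := by omega
    rw [PySem.List.pyRange_one_eq_nil (by exact_mod_cast hle),
        List.drop_eq_nil_of_le hle]
    rfl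
  | succ k ih =>
    intro i diff prev hk
    by_cases hlt : i < numStr.length
    · rw [PySem.List.pyRange_one_cons (by exact_mod_cast hlt),
          List.drop_eq_getElem_cons hlt]
      have hget : PySem.List.pyGet? numStr (i : Int) = some numStr[i] := by
        simp [PySem.List.pyGet?_natCast, List.getElem?_eq_getElem hlt]
      have hcast : (i : Int) + 1 = ((i + 1 : Nat) : Int) := by push_cast; ring
      simp only [checkStore_go, pvGo, hget, Option.getD_some, hcast]
      split_ifs with h1 h2
      · rfl
      · exact ih (i + 1) (-1 * diff) numStr[i] (by omega)
      · exact ih (i + 1) diff numStr[i] (by omega)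
    · have hle : numStr.length ≤ i := by omega
      rw [PySem.List.pyRange_one_eq_nil (by exact_mod_cast hle),
          List.drop_eq_nil_of_le hle]
      rfl

-- zigzag core: the flip-tracking loop equals the squared-difference predicate
lemma core_true : ∀ (t : List Int) (diff prev : Int),
    pvGo true diff prev t =
      if (pvAdj (prev :: t)).all (fun x => x * x == diff * diff) then
        pvClassify true ((pvAdj (prev :: t)).getLastD diff)
      else 10 := by
  intro t
  induction t with
  | nil => intro diff prev; simp [pvGo, pvAdj]
  | cons c t ih =>
    intro diff prev
    have hadj : pvAdj (prev :: c :: t) = (prev - c) :: pvAdj (c :: t) := rfl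
    have step : pvGo true diff prev (c :: t)
        = if prev - c ≠ diff then
            (if ¬ (true : Bool) = true ∨ c - prev ≠ diff then 10 else pvGo true (-1 * diff) c t)
          else pvGo true diff c t := rfl
    by_cases h1 : prev - c = diff
    · rw [step, if_neg (by omega), ih diff c, hadj, h1, List.getLastD_cons]
      simp
    · by_cases h2 : c - prev = diff
      · have hx : prev - c = -1 * diff := by omega
        rw [step, if_pos h1, if_neg (by simp [h2]), ih (-1 * diff) c, hadj]
        have hsq : (-1 * diff) * (-1 * diff) = diff * diff := by ring
        rw [hsq, hx, List.getLastD_cons]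
        simp
      · have hx : ((prev - c) * (prev - c) == diff * diff : Bool) = false := by
          simp only [beq_eq_false_iff_ne, ne_eq, mul_self_eq_mul_self_iff]
          push Not
          constructor <;> omega
        rw [step, if_pos h1, if_pos (Or.inr (by omega)), hadj]
        simp [List.all_cons, hx]

-- non-zigzag core: the loop equals "every adjacent difference equals diff"
lemma core_false : ∀ (t : List Int) (diff prev : Int),
    pvGo false diff prev t =
      if (pvAdj (prev :: t)).all (fun x => x == diff) then pvClassify false diff
      else 10 := by
  intro t
  induction t with
  | nil => intro diff prev; simp [pvGo, pvAdj]
  | cons c t ih =>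
    intro diff prev
    have hadj : pvAdj (prev :: c :: t) = (prev - c) :: pvAdj (c :: t) := rfl
    have step : pvGo false diff prev (c :: t)
        = if prev - c ≠ diff then
            (if ¬ (false : Bool) = true ∨ c - prev ≠ diff then 10 else pvGo false (-1 * diff) c t)
          else pvGo false diff c t := rfl
    by_cases h1 : prev - c = diff
    · rw [step, if_neg (by omega), ih diff c, hadj]
      simp [h1]
    · rw [step, if_pos h1, if_pos (Or.inl (by simp)), hadj]
      simp [List.all_cons, h1]

-- B's zip comprehension materializes exactly the consecutive differences
lemma zipAdj' : ∀ l : List Int,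
    (l.zip l.tail).map (fun p => p.1 - p.2) = pvAdj l := by
  intro l
  match l with
  | [] => rfl
  | [a] => rfl
  | a :: b :: t =>
    have := zipAdj' (b :: t)
    simpa [pvAdj, List.zip] using this

lemma zipAdj (l : List Int) :
    (l.zip (PySem.List.slice l (some 1) none)).map (fun p => p.1 - p.2) = pvAdj l := by
  rw [PySem.List.slice_from_one, zipAdj' l]

-- B's closed-form AP check equals "every adjacent difference equals d"
lemma apAll (l : List Int) (a d : Int) (h0 : l[0]? = some a) :
    ((PySem.List.pyRange 0 (l.length : Int) 1).all
       (fun i => (PySem.List.pyGet? l i).getD 0 == a - i * d))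
    = (pvAdj l).all (fun x => x == d) := by
  have hpos : 0 < l.length := by
    cases l with
    | nil => simp at h0
    | cons x t => simp
  have ha : l[0]'hpos = a := by
    rw [List.getElem?_eq_getElem hpos] at h0
    exact Option.some_inj.mp h0
  rw [Bool.eq_iff_iff]
  constructor
  · -- AP closed form → all adjacent diffs = d
    intro hall
    have hap : ∀ (k : Nat) (hk : k < l.length), l[k] = a - (k : Int) * d := by
      intro k hk
      have hm : ((k : Int)) ∈ PySem.List.pyRange 0 (l.length : Int) 1 := by
        rw [PySem.List.mem_pyRange_one]; constructor <;> [positivity; exact_mod_cast hk]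
      have := List.all_eq_true.mp hall _ hm
      rw [PySem.List.pyGet?_natCast, List.getElem?_eq_getElem hk] at this
      simpa using (beq_iff_eq.mp this)
    rw [List.all_eq_true]
    intro x hx
    obtain ⟨k, hk, rfl⟩ := List.mem_iff_getElem.mp hx
    have hk1 : k + 1 < l.length := by have := pvAdj_length l; omega
    rw [pvAdj_getElem l k hk (by omega) hk1, hap k (by omega), hap (k + 1) hk1]
    simp only [beq_iff_eq]; push_cast; ring
  · -- all adjacent diffs = d → AP closed form
    intro hall
    have hdif : ∀ (k : Nat) (hk : k + 1 < l.length),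
        l[k]'(Nat.lt_of_succ_lt hk) - l[k + 1]'hk = d := by
      intro k hk
      have hk' : k < (pvAdj l).length := by rw [pvAdj_length]; omega
      have hm : (pvAdj l)[k] ∈ pvAdj l := List.getElem_mem hk'
      have := beq_iff_eq.mp (List.all_eq_true.mp hall _ hm)
      rwa [pvAdj_getElem l k hk' (by omega) hk] at this
    have hap : ∀ (k : Nat) (hk : k < l.length), l[k] = a - (k : Int) * d := by
      intro k
      induction k with
      | zero => intro hk; simp [ha]
      | succ k ih =>
        intro hk
        have hv := hdif k hk
        have hih := ih (by omega)
        push_cast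
        linear_combination hih - hv
    rw [List.all_eq_true]
    intro x hx
    rw [PySem.List.mem_pyRange_one] at hx
    obtain ⟨hx0, hxl⟩ := hx
    have hk : x.toNat < l.length := by omega
    rw [PySem.List.pyGet?_of_nonneg _ hx0, List.getElem?_eq_getElem hk]
    simp only [Option.getD_some, beq_iff_eq]
    rw [hap x.toNat hk]
    congr 2
    omega

-- the endpoint difference numStr[-2]-numStr[-1] is the last consecutive difference
lemma lastEq (l : List Int) (h2 : 2 ≤ l.length) (dflt : Int) :
    (PySem.List.pyGet? l (-2)).getD 0 - (PySem.List.pyGet? l (-1)).getD 0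
      = (pvAdj l).getLastD dflt := by
  have hA : (pvAdj l).length = l.length - 1 := pvAdj_length l
  have hne : pvAdj l ≠ [] := by
    intro h; rw [h] at hA; simp at hA; omega
  rw [PySem.List.pyGet?_neg_ofNat l 2 (by omega) (by omega), PySem.List.pyGet?_neg_one,
    List.getLast?_eq_getElem?, List.getLastD_eq_getLast?, List.getLast?_eq_getElem?,
    List.getElem?_eq_getElem (by omega : l.length - 2 < l.length),
    List.getElem?_eq_getElem (by omega : l.length - 1 < l.length),
    List.getElem?_eq_getElem (by omega : (pvAdj l).length - 1 < (pvAdj l).length)]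
  simp only [Option.getD_some]
  rw [pvAdj_getElem l ((pvAdj l).length - 1) (by omega) (by omega) (by omega)]
  congr 2 <;> omega

-- if every element equals d, so does the last
lemma allGetLastD (l : List Int) (d : Int) (h : l.all (fun x => x == d) = true) :
    l.getLastD d = d := by
  match l with
  | [] => rfl
  | a :: t =>
    have hm : (a :: t).getLast (by simp) ∈ a :: t := List.getLast_mem _
    have := beq_iff_eq.mp (List.all_eq_true.mp h _ hm)
    rw [List.getLastD_eq_getLast?, List.getLast?_eq_some_getLast (by simp), Option.getD_some, this]

-- ===== VERDICT (by name: the statement is the Claim_ definition above) =====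
theorem checkStore_spec : Claim_equal_checkStore := by
  intro numStr _ hpre
  unfold Spec_checkStore
  unfold Pre_checkStore at hpre
  match numStr, hpre with
  | a0 :: a1 :: a2 :: rest, _ =>
    set l := a0 :: a1 :: a2 :: rest with hl
    have hlen : 3 ≤ l.length := by simp [hl]
    have hg0 : PySem.List.pyGet? l 0 = some a0 := by
      rw [PySem.List.pyGet?_of_nonneg _ (by norm_num)]; rfl
    have hg1 : PySem.List.pyGet? l 1 = some a1 := by
      rw [PySem.List.pyGet?_of_nonneg _ (by norm_num)]; rfl
    have hg2 : PySem.List.pyGet? l 2 = some a2 := by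
      rw [PySem.List.pyGet?_of_nonneg _ (by norm_num)]; rfl
    unfold checkStore checkStore_alt
    simp only [hg0, hg1, hg2, Option.getD_some]
    rw [show (2 : Int) = ((2 : Nat) : Int) from rfl,
      bridgeA l ((a0 - a1) == (a2 - a1)) l.length 2 (a0 - a1) a1 (by omega),
      show l.drop 2 = a2 :: rest from rfl]
    have hadj : pvAdj l = (a0 - a1) :: pvAdj (a1 :: a2 :: rest) := rfl
    have hlast : (PySem.List.pyGet? l (-2)).getD 0 - (PySem.List.pyGet? l (-1)).getD 0
        = (pvAdj (a1 :: a2 :: rest)).getLastD (a0 - a1) := by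
      rw [lastEq l (by omega) (a0 - a1), hadj, List.getLastD_cons]
    by_cases hz : a0 - a1 = a2 - a1
    · -- zigzag branch
      have hzb : ((a0 - a1) == (a2 - a1) : Bool) = true := beq_iff_eq.mpr hz
      have hzip : (l.zip (PySem.List.slice l (some 1) none)).all
          (fun p => (p.1 - p.2) * (p.1 - p.2) == (a0 - a1) * (a0 - a1))
          = (pvAdj l).all (fun x => x * x == (a0 - a1) * (a0 - a1)) := by
        rw [← zipAdj l, List.all_map]; rfl
      rw [hzb, core_true]
      simp only [hzip, hadj, List.all_cons]
      by_cases hall : ((pvAdj (a1 :: a2 :: rest)).all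
          (fun x => x * x == (a0 - a1) * (a0 - a1))) = true
      · rw [if_pos (by simp [hall])]
        simp [hall, pvClassify, hlast]
      · rw [if_neg (by simp [hall])]
        simp [hall]
    · -- non-zigzag branch
      have hzb : ((a0 - a1) == (a2 - a1) : Bool) = false := by simp [hz]
      have hap := apAll l a0 (a0 - a1) (by simp [hl])
      rw [hzb, core_false]
      by_cases hall : ((pvAdj (a1 :: a2 :: rest)).all (fun x => x == a0 - a1)) = true
      · have hlv : (pvAdj (a1 :: a2 :: rest)).getLastD (a0 - a1) = a0 - a1 :=
          allGetLastD _ _ hall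
        rw [if_pos (by simp [hall])]
        have hlv' : (pvAdj (a1 :: a2 :: rest)).getLast?.getD (a0 - a1) = a0 - a1 := by
          rw [← List.getLastD_eq_getLast?]; exact hlv
        simp only [hap, hadj, List.all_cons]
        simp [hall, pvClassify, mul_self_eq_one_iff, hlast, hlv']
      · rw [if_neg (by simp [hall])]
        simp only [hap, hadj, List.all_cons]
        simp [hall]
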